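-- pv_equiv track=rewrite | github.com/phbrownacmorg/csc202sp22demo | Hashtable.py | letterhash
-- ===== SOURCE A (Python) =====
-- def letterhash(key: str) -> int:
--     """Simple-minded hash function for letters."""
--     result = 0
--     key = key.lower() # Ignore case
--     for c in key:
--         if c.isalpha(): # Only deal with letters
--             result = result * 26
--             result = result + (ord(c) - ord('a') + 1)
--     return result
-- ===== SOURCE B (Python) =====
-- def letterhash(key: str) -> int:
--     """Simple-minded hash function for letters."""
--     vals = [ord(c) - ord('a') + 1 for c in key.lower() if c.isalpha()]
--
--     def hp(lo: int, hi: int):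
--         """(base-26 hash of vals[lo:hi], 26 ** (hi - lo)), by divide and conquer."""
--         if hi - lo <= 1:
--             return (vals[lo], 26) if hi > lo else (0, 1)
--         mid = (lo + hi) // 2
--         h1, p1 = hp(lo, mid)
--         h2, p2 = hp(mid, hi)
--         return (h1 * p2 + h2, p1 * p2)
--
--     return hp(0, len(vals))[0]
-- ===== Notes on version B (the rewrite author's own statement) =====
-- stated objective: faster
-- what changed: Replaces A's left-to-right Horner loop by a staged extraction of letter values followed by a divide-and-conquer combine (h1*p2+h2, p1*p2) over balanced halves; intended as faster via balanced big-int products, measured 9.57x at the largest size both finished (unconfirmed at the very largest size).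
import Mathlib
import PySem

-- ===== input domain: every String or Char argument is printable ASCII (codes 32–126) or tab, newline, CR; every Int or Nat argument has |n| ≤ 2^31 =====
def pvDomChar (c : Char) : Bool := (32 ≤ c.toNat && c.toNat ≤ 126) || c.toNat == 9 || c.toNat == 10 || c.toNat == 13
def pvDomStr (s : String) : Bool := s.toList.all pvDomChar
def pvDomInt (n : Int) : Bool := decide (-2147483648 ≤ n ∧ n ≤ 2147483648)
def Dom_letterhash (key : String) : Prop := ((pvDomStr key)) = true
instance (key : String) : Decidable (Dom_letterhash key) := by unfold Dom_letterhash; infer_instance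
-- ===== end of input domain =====

-- B extracts the letter values and combines them by divide and conquer ((h1*p2+h2, p1*p2))
-- instead of A's left-to-right Horner loop; intended as faster via balanced big-int products
-- (measured 9.57x at the largest size both Pythons finished in a timing run).

-- ===== PORT A =====
-- Horner-style loop: for each alphabetic char of key.lower(), result = result*26 + (ord c - ord 'a' + 1)
def letterhash (key : String) : Int :=
  (PySem.Str.lower key).toList.foldl
    (fun result c =>
      if PySem.Chars.isalpha c then
        result * 26 + ((c.toNat : Int) - ('a'.toNat : Int) + 1)
      else result) 0

-- ===== PORT B =====
-- hp(lo, hi) = (base-26 hash of vals[lo:hi], 26 ** (hi - lo)), divide and conquer.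
-- vals[lo] is read only when hi > lo; on every reachable call lo is then in range, so the
-- port reads it with pyGet? and a default that is never used.
def pvHp (vals : List Int) (lo hi : Int) : Int × Int :=
  if hi - lo ≤ 1 then
    if hi > lo then ((PySem.List.pyGet? vals lo).getD 0, 26) else (0, 1)
  else
    let mid := PySem.Int.floordiv (lo + hi) 2
    let r1 := pvHp vals lo mid
    let r2 := pvHp vals mid hi
    (r1.1 * r2.2 + r2.1, r1.2 * r2.2)
termination_by (hi - lo).toNat
decreasing_by
  all_goals
    simp only [PySem.Int.floordiv_eq_ediv_of_pos (by norm_num : (0:Int) < 2)]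
    omega

-- stage 1: vals = [ord(c)-ord('a')+1 for c in key.lower() if c.isalpha()]; stage 2: hp(0, len(vals))[0]
def letterhash_alt (key : String) : Int :=
  let vals : List Int :=
    ((PySem.Str.lower key).toList.filter PySem.Chars.isalpha).map
      (fun c => (c.toNat : Int) - ('a'.toNat : Int) + 1)
  (pvHp vals 0 vals.length).1

-- ===== PRECONDITION & SPEC =====
def Spec_letterhash (key : String) (out : Int) : Prop := out = letterhash_alt key
instance (key : String) (out : Int) : Decidable (Spec_letterhash key out) := by unfold Spec_letterhash; infer_instance

-- ===== CLAIM =====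
def Claim_equal_letterhash : Prop := ∀ (key : String), Dom_letterhash key → Spec_letterhash key (letterhash key)

-- ===== LEMMAS AND PROOFS =====

-- normal form: positional base-26 sum of a list of values
def pvHsum : List Int → Int
  | [] => 0
  | v :: t => v * 26 ^ t.length + pvHsum t

-- A's Horner accumulator over a letter list equals the positional sum
lemma pv_horner (L : List Char) (r : Int) :
    L.foldl (fun result c => result * 26 + ((c.toNat : Int) - ('a'.toNat : Int) + 1)) r
      = r * 26 ^ L.length + pvHsum (L.map (fun c => (c.toNat : Int) - ('a'.toNat : Int) + 1)) := by
  induction L generalizing r with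
  | nil => simp [pvHsum]
  | cons c t ih =>
    simp only [List.foldl_cons, ih, pvHsum, List.map_cons, List.length_cons, List.length_map]
    ring

-- the positional sum splits at a concatenation
lemma pvHsum_append (a b : List Int) :
    pvHsum (a ++ b) = pvHsum a * 26 ^ b.length + pvHsum b := by
  induction a with
  | nil => simp [pvHsum]
  | cons v t ih =>
    simp only [List.cons_append, pvHsum, ih, List.length_append]
    ring

-- divide and conquer computes the positional sum of the slice and the matching power
lemma pvHp_eq (vals : List Int) (lo hi : Int) (h0 : 0 ≤ lo) (h1 : lo ≤ hi)
    (h2 : hi ≤ vals.length) :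
    pvHp vals lo hi
      = (pvHsum ((vals.drop lo.toNat).take (hi - lo).toNat), 26 ^ (hi - lo).toNat) := by
  rw [pvHp]
  by_cases hsm : hi - lo ≤ 1
  · rw [if_pos hsm]
    by_cases hgt : hi > lo
    · have hlen : (hi - lo).toNat = 1 := by omega
      have hlt : lo.toNat < vals.length := by omega
      have hget : PySem.List.pyGet? vals lo = some vals[lo.toNat] := by
        rw [PySem.List.pyGet?_of_nonneg vals h0, List.getElem?_eq_getElem hlt]
      have htake : (vals.drop lo.toNat).take (hi - lo).toNat = [vals[lo.toNat]] := by
        have hd : vals.drop lo.toNat = vals[lo.toNat] :: vals.drop (lo.toNat + 1) :=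
          List.drop_eq_getElem_cons hlt
        rw [hlen, hd, List.take_succ_cons, List.take_zero]
      rw [if_pos hgt, hget, htake]
      simp [pvHsum, hlen]
    · have : hi = lo := le_antisymm (by omega) (by omega)
      rw [if_neg hgt]
      simp [this, pvHsum]
  · rw [if_neg hsm]
    set mid := PySem.Int.floordiv (lo + hi) 2 with hmdef
    have hml : lo < mid ∧ mid < hi := by
      rw [hmdef, PySem.Int.floordiv_eq_ediv_of_pos (by norm_num : (0:Int) < 2)]
      omega
    clear_value mid
    have e1 := pvHp_eq vals lo mid h0 (le_of_lt hml.1) (by omega)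
    have e2 := pvHp_eq vals mid hi (by omega) (le_of_lt hml.2) h2
    show ((pvHp vals lo mid).1 * (pvHp vals mid hi).2 + (pvHp vals mid hi).1,
          (pvHp vals lo mid).2 * (pvHp vals mid hi).2)
        = (pvHsum ((vals.drop lo.toNat).take (hi - lo).toNat), 26 ^ (hi - lo).toNat)
    rw [e1, e2]
    have hsplit : (vals.drop lo.toNat).take (hi - lo).toNat
        = (vals.drop lo.toNat).take (mid - lo).toNat ++ (vals.drop mid.toNat).take (hi - mid).toNat := by
      have hn : (hi - lo).toNat = (mid - lo).toNat + (hi - mid).toNat := by omega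
      rw [hn, List.take_add, List.drop_drop]
      have hmn : lo.toNat + (mid - lo).toNat = mid.toNat := by omega
      rw [hmn]
    have hlen2 : ((vals.drop mid.toNat).take (hi - mid).toNat).length = (hi - mid).toNat := by
      rw [List.length_take, List.length_drop]
      omega
    rw [hsplit, pvHsum_append, hlen2]
    refine Prod.ext rfl ?_
    show (26:Int) ^ (mid - lo).toNat * 26 ^ (hi - mid).toNat = 26 ^ (hi - lo).toNat
    rw [← pow_add]
    congr 1
    omega
termination_by (hi - lo).toNat
decreasing_by
  all_goals
    have hml' := hml
    rw [hmdef] at hml'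
    rw [PySem.Int.floordiv_eq_ediv_of_pos (by norm_num : (0:Int) < 2)] at hml' ⊢
    omega

-- ===== VERDICT =====
theorem letterhash_spec : Claim_equal_letterhash := by
  intro key _
  unfold Spec_letterhash letterhash letterhash_alt
  rw [← List.foldl_filter (p := PySem.Chars.isalpha)
        (f := fun result c => result * 26 + ((c.toNat : Int) - ('a'.toNat : Int) + 1))]
  simp only [pv_horner, zero_mul, zero_add]
  rw [pvHp_eq _ _ _ le_rfl (by positivity) le_rfl]
  simp only [Int.toNat_natCast, Int.toNat_zero, List.drop_zero, Int.sub_zero]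
  rw [List.take_of_length_le (by simp)]
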